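-- pv_equiv track=rewrite | github.com/BlackBearCC/ZZZero | scripts/merge_model_params.py | parse_params_file
-- ===== SOURCE A (Python) =====
-- from typing import Dict, List
--
-- def parse_params_file(content: str) -> Dict[str, List[str]]:
--     """解析模型参数文件 -> {模型名: [参数行,...]}"""
--     params_map: Dict[str, List[str]] = {}
--     current_name: str | None = None
--     current_lines: List[str] = []
--
--     for raw_line in content.splitlines():
--         line = raw_line.rstrip("\n")
--         if line.endswith(".yaml:"):
--             # 如果已有模型正在收集，先保存
--             if current_name:
--                 params_map[current_name] = current_lines
--             # 新模型开始
--             name_with_ext = line[:-1]  # 去掉尾部冒号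
--             # 去掉 .yaml 后缀 => 模型名
--             current_name = name_with_ext[:-5] if name_with_ext.endswith(".yaml") else name_with_ext
--             current_lines = []
--         else:
--             if line.strip():  # 跳过空行
--                 current_lines.append(line)
--     # 收尾
--     if current_name:
--         params_map[current_name] = current_lines
--     return params_map
-- ===== SOURCE B (Python) =====
-- from typing import Dict, List
--
--
-- def parse_params_file(content: str) -> Dict[str, List[str]]:
--     """解析模型参数文件 -> {模型名: [参数行,...]}
--     Segment-based: jump from header to header, collecting each body slice,
--     instead of a per-line state machine with a pending (name, lines) pair."""
--     lines = content.splitlines()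
--     n = len(lines)
--     params_map: Dict[str, List[str]] = {}
--     i = 0
--     while i < n:
--         line = lines[i]
--         i += 1
--         if not line.endswith(".yaml:"):
--             continue  # lines before/without a header are ignored here
--         name = line[:-6]  # drop the ".yaml:" suffix in one cut
--         body: List[str] = []
--         while i < n and not lines[i].endswith(".yaml:"):
--             if lines[i].strip():
--                 body.append(lines[i])
--             i += 1
--         if name:  # an empty model name is dropped
--             params_map[name] = body
--     return params_map
-- ===== Notes on version B (the rewrite author's own statement) =====
-- stated objective: alternative
-- what changed: Replaces A's per-line state machine carrying a dict plus a pending Optional[str] name and pending line list with a segment-based scan that jumps from header to header and collects each body slice in an inner loop, inserting it immediately.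
import Mathlib
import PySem

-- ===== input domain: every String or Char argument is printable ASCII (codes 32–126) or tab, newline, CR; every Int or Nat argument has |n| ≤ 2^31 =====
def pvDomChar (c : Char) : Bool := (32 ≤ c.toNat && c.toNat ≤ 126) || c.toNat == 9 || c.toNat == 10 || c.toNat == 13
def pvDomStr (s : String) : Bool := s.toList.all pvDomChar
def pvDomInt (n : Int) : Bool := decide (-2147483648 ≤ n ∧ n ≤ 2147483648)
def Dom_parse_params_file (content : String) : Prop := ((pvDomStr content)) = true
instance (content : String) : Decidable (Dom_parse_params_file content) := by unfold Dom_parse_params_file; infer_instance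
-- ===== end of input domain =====

-- B replaces A's per-line state machine (dict + pending Optional name + pending lines)
-- by a segment-based scan that jumps from header to header and collects each body slice;
-- same return value, similar cost (objective: alternative).

-- ===== PORT A =====

/-- Python truthiness of `current_name : str | None`. -/
def ppfTruthy : Option String → Bool
  | none => false
  | some s => !(s == "")

/-- Exact port of `raw_line.rstrip("\n")`: remove trailing `'\n'` characters. -/
def ppfRstripNl (s : String) : String :=
  String.ofList ((s.toList.reverse.dropWhile (· == '\n')).reverse)

/-- Final `if current_name: params_map[current_name] = current_lines` (also used
    inside the loop when a new header is met). -/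
def ppfFinish (st : PySem.Dict String (List String) × Option String × List String) :
    PySem.Dict String (List String) :=
  if ppfTruthy st.2.1 then st.1.insert (st.2.1.getD "") st.2.2 else st.1

/-- One iteration of A's `for raw_line in content.splitlines()` loop. -/
def ppfStepA (st : PySem.Dict String (List String) × Option String × List String)
    (raw_line : String) : PySem.Dict String (List String) × Option String × List String :=
  let line := ppfRstripNl raw_line
  if PySem.Str.endswith line ".yaml:" then
    let params_map := ppfFinish st
    let name_with_ext := PySem.Str.slice line none (some (-1))
    let current_name :=
      if PySem.Str.endswith name_with_ext ".yaml" then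
        PySem.Str.slice name_with_ext none (some (-5))
      else name_with_ext
    (params_map, some current_name, ([] : List String))
  else
    if !(PySem.Str.strip line == "") then (st.1, st.2.1, st.2.2 ++ [line]) else st

def parse_params_file (content : String) : List (String × List String) :=
  let st := (PySem.Str.splitlines content).foldl ppfStepA (PySem.Dict.empty, none, [])
  (ppfFinish st).items

-- ===== PORT B =====

/-- B's inner `while` loop: the non-blank lines before the next header, together with
    the remaining lines from that header on (the loop reads `lines[i:]`; here the
    index-based scan is the obvious structural recursion over that suffix). -/
def ppfSegment : List String → List String × List String
  | [] => ([], [])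
  | l :: ls =>
    if PySem.Str.endswith l ".yaml:" then ([], l :: ls)
    else
      let p := ppfSegment ls
      (if !(PySem.Str.strip l == "") then l :: p.1 else p.1, p.2)

theorem ppfSegment_snd_length_le (ls : List String) : (ppfSegment ls).2.length ≤ ls.length := by
  induction ls with
  | nil => simp [ppfSegment]
  | cons l ls ih =>
    simp only [ppfSegment]
    split
    · simp
    · simpa using Nat.le_succ_of_le ih

/-- B's outer `while i < n` loop over the remaining lines, with the accumulated dict. -/
def ppfParse : List String → PySem.Dict String (List String) → PySem.Dict String (List String)
  | [], acc => acc
  | line :: ls, acc =>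
    if PySem.Str.endswith line ".yaml:" then
      let name := PySem.Str.slice line none (some (-6))
      let p := ppfSegment ls
      ppfParse p.2 (if !(name == "") then acc.insert name p.1 else acc)
    else ppfParse ls acc
termination_by ls => ls.length
decreasing_by
  · exact Nat.lt_succ_of_le (ppfSegment_snd_length_le ls)
  · simp

def parse_params_file_alt (content : String) : List (String × List String) :=
  (ppfParse (PySem.Str.splitlines content) PySem.Dict.empty).items

-- ===== PRECONDITION & SPEC =====
def Spec_parse_params_file (content : String) (out : List (String × List String)) : Prop := out = parse_params_file_alt content
instance (content : String) (out : List (String × List String)) : Decidable (Spec_parse_params_file content out) := by unfold Spec_parse_params_file; infer_instance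

-- ===== CLAIM (what is proved, stated in full; the proofs are below) =====
def Claim_equal_parse_params_file : Prop := ∀ (content : String), Dom_parse_params_file content → Spec_parse_params_file content (parse_params_file content)

-- ===== LEMMAS AND PROOFS =====

/-- `splitlines.go` only ever emits pieces free of line-break characters. -/
theorem ppf_go_nb (isB : Char → Bool) (s cur : List Char) (acc : List (List Char))
    (hc : ∀ c ∈ cur, isB c = false)
    (ha : ∀ l ∈ acc, ∀ c ∈ l, isB c = false) :
    ∀ l ∈ PySem.Chars.splitlines.go isB s cur acc, ∀ c ∈ l, isB c = false := by
  fun_induction PySem.Chars.splitlines.go isB s cur acc with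
  | case1 cur acc h =>
    intro l hl c hcc
    exact ha l (by simpa using hl) c hcc
  | case2 cur acc h =>
    intro l hl c hcc
    simp at hl
    rcases hl with h' | h'
    · exact ha l h' c hcc
    · subst h'; exact hc c (by simpa using hcc)
  | case3 rest cur acc ih =>
    refine ih ?_ ?_
    · simp
    · intro l hl c hcc
      simp at hl
      rcases hl with h' | h'
      · subst h'; exact hc c (by simpa using hcc)
      · exact ha l h' c hcc
  | case4 c rest cur acc hne hb ih =>
    refine ih ?_ ?_
    · simp
    · intro l hl c' hcc
      simp at hl
      rcases hl with h' | h'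
      · subst h'; exact hc c' (by simpa using hcc)
      · exact ha l h' c' hcc
  | case5 c rest cur acc hne hb ih =>
    refine ih ?_ ha
    intro c' hcc
    simp at hcc
    rcases hcc with h' | h'
    · subst h'; simpa using hb
    · exact hc c' h'

/-- Pieces of `splitlines` contain no `'\n'`, so `rstrip("\n")` is the identity on them. -/
theorem ppfRstripNl_of_mem_splitlines (content l : String)
    (hl : l ∈ PySem.Str.splitlines content) : ppfRstripNl l = l := by
  have hmem : l.toList ∈ PySem.Chars.splitlines content.toList := by
    rw [← PySem.Str.splitlines_map_toList]
    exact List.mem_map_of_mem hl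
  have hnb : ∀ c ∈ l.toList, ('\n' : Char) ∉ [c] := by
    intro c hcc hc1
    have := ppf_go_nb _ content.toList [] [] (by simp) (by simp) l.toList hmem c hcc
    simp at hc1
    subst hc1
    simp at this
  have hnl : ∀ c ∈ l.toList.reverse, c ≠ '\n' := by
    intro c hcc he
    subst he
    exact hnb '\n' (List.mem_reverse.mp hcc) (by simp)
  have hdrop : l.toList.reverse.dropWhile (· == '\n') = l.toList.reverse := by
    cases hrev : l.toList.reverse with
    | nil => simp
    | cons c cs =>
      rw [List.dropWhile_cons_of_neg]
      simp only [beq_iff_eq]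
      exact hnl c (by rw [hrev]; simp)
  simp [ppfRstripNl, hdrop, String.ofList_toList]

/-- Negative-stop slice on lists: `xs[:-k]` keeps all but the last `k` elements. -/
theorem ppf_slice_neg {α : Type} (xs : List α) (k : Int) (hk : k < 0) (hk2 : -k ≤ (xs.length : Int)) :
    PySem.List.slice xs none (some k) = xs.take (xs.length - (-k).toNat) := by
  simp only [PySem.List.slice, PySem.List.clampIdx]
  have h2 : ¬ ((xs.length : Int) + k < 0) := by omega
  rw [if_pos hk, if_neg h2]
  congr 1
  omega

/-- A's two-step name derivation (drop `":"`, then drop `".yaml"`) equals B's one cut. -/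
theorem ppf_name (line : String) (h : PySem.Str.endswith line ".yaml:" = true) :
    (if PySem.Str.endswith (PySem.Str.slice line none (some (-1))) ".yaml" then
        PySem.Str.slice (PySem.Str.slice line none (some (-1))) none (some (-5))
      else PySem.Str.slice line none (some (-1)))
    = PySem.Str.slice line none (some (-6)) := by
  rw [PySem.Str.endswith_eq] at h
  obtain ⟨pre, hpre⟩ := (PySem.Chars.endswith_iff _ _).mp h
  have hsuf : (".yaml:" : String).toList = ['.', 'y', 'a', 'm', 'l', ':'] := by decide
  rw [hsuf] at hpre
  have h1 : (PySem.Str.slice line none (some (-1))).toList = pre ++ ['.', 'y', 'a', 'm', 'l'] := by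
    rw [PySem.Str.toList_slice, PySem.Chars.slice_eq_listSlice,
      ppf_slice_neg line.toList (-1) (by omega) (by rw [← hpre]; simp; omega),
      ← hpre]
    simp [List.take_append]
  have h2 : PySem.Str.endswith (PySem.Str.slice line none (some (-1))) ".yaml" = true := by
    rw [PySem.Str.endswith_eq]
    apply (PySem.Chars.endswith_iff _ _).mpr
    rw [h1]
    exact ⟨pre, by rw [show (".yaml" : String).toList = ['.', 'y', 'a', 'm', 'l'] by decide]⟩
  rw [if_pos h2]
  apply String.toList_inj.mp
  rw [PySem.Str.toList_slice, PySem.Chars.slice_eq_listSlice,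
    ppf_slice_neg _ (-5) (by omega) (by rw [h1]; simp), h1,
    PySem.Str.toList_slice, PySem.Chars.slice_eq_listSlice,
    ppf_slice_neg _ (-6) (by omega) (by rw [← hpre]; simp), ← hpre]
  simp

/-- B's body segment, attributed to the pending name, is exactly what A's state machine
    accumulates while no header shows up. -/
theorem ppf_L1 (ls : List String) (hnl : ∀ l ∈ ls, ppfRstripNl l = l) :
    ∀ (d : PySem.Dict String (List String)) (name : String) (cur : List String),
    ppfFinish (ls.foldl ppfStepA (d, some name, cur)) =
      ppfParse (ppfSegment ls).2 (ppfFinish (d, some name, cur ++ (ppfSegment ls).1)) := by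
  induction ls with
  | nil => intro d name cur; simp [ppfSegment, ppfParse]
  | cons l ls ih =>
    intro d name cur
    have hl : ppfRstripNl l = l := hnl l (by simp)
    have hls : ∀ l' ∈ ls, ppfRstripNl l' = l' := fun l' h' => hnl l' (by simp [h'])
    by_cases hh : PySem.Str.endswith l ".yaml:" = true
    · -- header: A saves the pending pair and starts afresh; B recurses on the suffix
      simp only [ppfSegment, if_pos hh, List.foldl_cons]
      rw [show ppfStepA (d, some name, cur) l =
          (ppfFinish (d, some name, cur), some (PySem.Str.slice l none (some (-6))), []) by
        simp only [ppfStepA, hl, if_pos hh, ppf_name l hh]]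
      rw [ih hls]
      conv_rhs => rw [ppfParse]
      rw [if_pos hh]
      simp only [ppfFinish, ppfTruthy, List.nil_append, List.append_nil, Option.getD_some]
    · -- non-header: both sides just extend the current body
      simp only [ppfSegment, if_neg hh, List.foldl_cons]
      by_cases hb : PySem.Str.strip l = ""
      · rw [show ppfStepA (d, some name, cur) l = (d, some name, cur) by
          simp only [ppfStepA]; rw [hl, if_neg hh]; simp [hb]]
        rw [ih hls]
        simp [hb]
      · rw [show ppfStepA (d, some name, cur) l = (d, some name, cur ++ [l]) by
          simp only [ppfStepA]; rw [hl, if_neg hh]; simp [hb]]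
        rw [ih hls]
        simp [hb]

/-- Before the first header both programs ignore every line. -/
theorem ppf_L0 (ls : List String) (hnl : ∀ l ∈ ls, ppfRstripNl l = l) :
    ∀ (d : PySem.Dict String (List String)) (cur : List String),
    ppfFinish (ls.foldl ppfStepA (d, none, cur)) = ppfParse ls d := by
  induction ls with
  | nil => intro d cur; simp [ppfParse, ppfFinish, ppfTruthy]
  | cons l ls ih =>
    intro d cur
    have hl : ppfRstripNl l = l := hnl l (by simp)
    have hls : ∀ l' ∈ ls, ppfRstripNl l' = l' := fun l' h' => hnl l' (by simp [h'])
    by_cases hh : PySem.Str.endswith l ".yaml:" = true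
    · simp only [List.foldl_cons]
      rw [show ppfStepA (d, none, cur) l =
          (d, some (PySem.Str.slice l none (some (-6))), []) by
        simp only [ppfStepA, hl, if_pos hh, ppf_name l hh, ppfFinish, ppfTruthy]
        simp]
      rw [ppf_L1 ls hls]
      conv_rhs => rw [ppfParse]
      rw [if_pos hh]
      simp only [ppfFinish, ppfTruthy, List.nil_append, Option.getD_some]
    · simp only [List.foldl_cons]
      conv_rhs => rw [ppfParse]
      rw [if_neg hh]
      by_cases hb : PySem.Str.strip l = ""
      · rw [show ppfStepA (d, none, cur) l = (d, none, cur) by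
          simp only [ppfStepA]; rw [hl, if_neg hh]; simp [hb]]
        exact ih hls d cur
      · rw [show ppfStepA (d, none, cur) l = (d, none, cur ++ [l]) by
          simp only [ppfStepA]; rw [hl, if_neg hh]; simp [hb]]
        exact ih hls d (cur ++ [l])

-- ===== VERDICT (by name: the statement is the Claim_ definition above) =====
theorem parse_params_file_spec : Claim_equal_parse_params_file := by
  intro content _
  unfold Spec_parse_params_file parse_params_file parse_params_file_alt
  show (ppfFinish ((PySem.Str.splitlines content).foldl ppfStepA
      (PySem.Dict.empty, none, []))).items = _
  rw [ppf_L0 (PySem.Str.splitlines content)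
    (fun l hl => ppfRstripNl_of_mem_splitlines content l hl)]
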